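-- pv_equiv track=rewrite | github.com/AdamLBS/COMP8760-Computer-Security | exercise3/test.py | generate_personalised_dictionary
-- ===== SOURCE A (Python) =====
-- from itertools import permutations, product
--
-- substitutions = {
--     'a': '@',
--     'e': '3',
--     'i': '1',
--     'o': '0',
--     's': '$',
-- }
--
-- def generate_variations(word):
--     variations = {word}  # Start with the original word
--     for original, sub in substitutions.items():
--         variations.update(word.replace(original, sub) for original in substitutions)
--     return list(variations)
--
-- def generate_personalised_dictionary(info):
--     dictionary = set()
--     for word in info:
--         dictionary.update(generate_variations(word))  # Add variations
--         dictionary.update(f"{word}{num}" for num in range(100))  # Add numbers as suffix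
--     # Generate permutations and combinations of words
--     for r in range(2, 6):  # Generate combinations of 2 to 5 elements
--         for combo in product(info, repeat=r):
--             dictionary.add("".join(combo))
--     return list(dictionary)
-- ===== SOURCE B (Python) =====
-- substitutions = {
--     'a': '@',
--     'e': '3',
--     'i': '1',
--     'o': '0',
--     's': '$',
-- }
--
-- def generate_personalised_dictionary(info):
--     words = list(info)
--     dictionary = set()
--     for word in words:
--         # same quirky variation set as the original: every key replaced by every sub char
--         variations = {word}
--         for sub in substitutions.values():
--             for key in substitutions:
--                 variations.add(word.replace(key, sub))
--         for v in variations: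
--             dictionary.add(v)
--         for num in range(100):
--             dictionary.add(word + str(num))
--     # incremental level-by-level concatenations of 2..5 words; each level keeps only the
--     # distinct strings (first occurrences, in order), so duplicate prefixes are expanded once
--     current = words
--     for _ in range(4):
--         current = list(dict.fromkeys(prefix + w for prefix in current for w in words))
--         dictionary.update(current)
--     return list(dictionary)
-- ===== Notes on version B (the rewrite author's own statement) =====
-- stated objective: alternative
-- what changed: Replaces the per-length regeneration of itertools.product(info, repeat=r) for r=2..5 (joining every r-tuple of words from scratch) by an incremental level-by-level builder: each level of concatenations is obtained by extending the previous level's distinct strings (ordered dedup via dict.fromkeys) by one word, so no tuples are built or joined; the variation/number-suffix pass uses explicit loops instead of set comprehensions.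
import Mathlib
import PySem

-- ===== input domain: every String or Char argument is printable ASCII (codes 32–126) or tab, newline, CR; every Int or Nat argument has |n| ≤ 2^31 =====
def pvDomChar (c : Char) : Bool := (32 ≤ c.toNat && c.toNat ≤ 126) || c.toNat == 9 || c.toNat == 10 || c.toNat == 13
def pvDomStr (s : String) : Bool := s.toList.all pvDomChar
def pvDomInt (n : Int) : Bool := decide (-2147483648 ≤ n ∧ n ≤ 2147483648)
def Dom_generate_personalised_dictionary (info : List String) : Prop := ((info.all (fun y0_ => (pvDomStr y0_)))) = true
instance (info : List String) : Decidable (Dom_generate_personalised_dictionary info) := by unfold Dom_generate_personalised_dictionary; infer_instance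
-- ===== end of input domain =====

-- B replaces the per-length regeneration of all word products (r = 2..5) by an incremental,
-- level-by-level builder that extends the previous, deduplicated level by one word at a time.
-- Both functions return list(set(...)); the Lean ports return the set in first-insertion order.

-- ===== PORT A =====
def pvSubstitutions : PySem.Dict String String :=
  PySem.Dict.ofList [("a", "@"), ("e", "3"), ("i", "1"), ("o", "0"), ("s", "$")]

def generate_variations (word : String) : List String :=
  let variations : PySem.Set String := PySem.Set.ofList [word]
  let variations := (PySem.Dict.items pvSubstitutions).foldl
    (fun vs p => PySem.Set.update vs
      ((PySem.Dict.keys pvSubstitutions).map (fun original => PySem.Str.replace word original p.2)))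
    variations
  variations

-- itertools.product(info, repeat=r), transcribed from its documented pure-Python equivalent
-- (result = [x+[y] for x in result for y in pool], once per pool)
def pvProduct (info : List String) (r : Nat) : List (List String) :=
  (List.range r).foldl (fun result _ => result.flatMap (fun x => info.map (fun y => x ++ [y]))) [[]]

def generate_personalised_dictionary (info : List String) : List String :=
  let dictionary : PySem.Set String := PySem.Set.empty
  let dictionary := info.foldl (fun d word =>
      let d := PySem.Set.update d (generate_variations word)
      PySem.Set.update d ((PySem.List.pyRange 0 100 1).map (fun num => word ++ PySem.Int.toStr num)))
    dictionary
  let dictionary := (PySem.List.pyRange 2 6 1).foldl (fun d r =>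
      (pvProduct info r.toNat).foldl (fun d combo => PySem.Set.add d (PySem.Str.join "" combo)) d)
    dictionary
  dictionary

-- ===== PORT B =====
def pvSubChars : List String := ["@", "3", "1", "0", "$"]
def pvSubKeys : List String := ["a", "e", "i", "o", "s"]

def generate_personalised_dictionary_alt (info : List String) : List String :=
  let d : PySem.Set String := info.foldl (fun d word =>
      let variations : PySem.Set String := PySem.Set.ofList [word]
      let variations := pvSubChars.foldl (fun d sub =>
          pvSubKeys.foldl (fun d key => PySem.Set.add d (PySem.Str.replace word key sub)) d) variations
      let d := PySem.Set.update d variations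
      (PySem.List.pyRange 0 100 1).foldl (fun d num => PySem.Set.add d (word ++ PySem.Int.toStr num)) d)
    PySem.Set.empty
  let st := (List.range 4).foldl (fun (st : PySem.Set String × List String) _ =>
      let current := PySem.List.dedup (st.2.flatMap (fun pre => info.map (fun w => pre ++ w)))
      (PySem.Set.update st.1 current, current))
    (d, info)
  st.1

-- ===== PRECONDITION & SPEC =====
def Spec_generate_personalised_dictionary (info : List String) (out : List String) : Prop := out = generate_personalised_dictionary_alt info
instance (info : List String) (out : List String) : Decidable (Spec_generate_personalised_dictionary info out) := by unfold Spec_generate_personalised_dictionary; infer_instance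

-- ===== CLAIM (what is proved, stated in full; the proofs are below) =====
def Claim_equal_generate_personalised_dictionary : Prop := ∀ (info : List String), Dom_generate_personalised_dictionary info → Spec_generate_personalised_dictionary info (generate_personalised_dictionary info)

-- ===== LEMMAS AND PROOFS =====

-- the string sequence generate_variations inserts after the word itself
def pvLw (word : String) : List String :=
  pvSubChars.flatMap (fun sub => pvSubKeys.map (fun key => PySem.Str.replace word key sub))

-- the joined products of length r, in A's enumeration order
def pvStrs (info : List String) (r : Nat) : List String :=
  (pvProduct info r).map (PySem.Str.join "")

theorem pv_flat_inter (l : List (List Char)) : (List.intersperse [] l).flatten = l.flatten := by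
  induction l with
  | nil => rfl
  | cons a l ih => cases l <;> simp_all

theorem pv_join_append (l : List String) (y : String) :
    PySem.Str.join "" (l ++ [y]) = PySem.Str.join "" l ++ y := by
  simp [PySem.Str.join, PySem.Chars.join, List.intercalate, pv_flat_inter]

theorem pv_join_singleton (y : String) : PySem.Str.join "" [y] = y := by
  simp [PySem.Str.join, PySem.Chars.join, List.intercalate]

theorem pv_upd_ofList (s : PySem.Set String) (xs : List String) :
    PySem.Set.update s (PySem.Set.ofList xs) = PySem.Set.update s xs := by
  rw [PySem.Set.update_eq_append_filter, PySem.Set.update_eq_append_filter, PySem.Set.ofList_ofList]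

theorem pv_upd_subset (s : PySem.Set String) (xs : List String)
    (h : ∀ y ∈ xs, y ∈ s) : PySem.Set.update s xs = s := by
  rw [PySem.Set.update_eq_append_filter]
  have h2 : List.filter (fun y => !s.contains y) (PySem.Set.ofList xs) = [] := by
    rw [List.filter_eq_nil_iff]
    intro y hy
    simp [h y (by simpa [PySem.Set.mem_ofList] using hy)]
  rw [h2, List.append_nil]

theorem pv_ofList_flatMap (l : List String) (f : String → List String) :
    PySem.Set.ofList ((PySem.Set.ofList l).flatMap f) = PySem.Set.ofList (l.flatMap f) := by
  induction l using List.reverseRecOn with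
  | nil => rfl
  | append_singleton l x ih =>
    by_cases hx : x ∈ l
    · rw [PySem.Set.ofList_append_singleton,
        PySem.Set.add_of_mem (by simpa [PySem.Set.mem_ofList] using hx), ih,
        List.flatMap_append, PySem.Set.ofList_append, pv_upd_subset]
      intro y hy
      simp only [List.flatMap_cons, List.flatMap_nil, List.append_nil] at hy
      exact (PySem.Set.mem_ofList _ _).2 (List.mem_flatMap.2 ⟨x, hx, hy⟩)
    · rw [PySem.Set.ofList_append_singleton,
        PySem.Set.add_of_not_mem (by simpa [PySem.Set.mem_ofList] using hx),
        List.flatMap_append, List.flatMap_append, PySem.Set.ofList_append, PySem.Set.ofList_append, ih]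

theorem pv_strs_one (info : List String) : pvStrs info 1 = info := by
  simp [pvStrs, pvProduct, List.range_succ, Function.comp_def, pv_join_singleton]

theorem pv_strs_succ (info : List String) (r : Nat) :
    pvStrs info (r + 1) = (pvStrs info r).flatMap (fun a => info.map (fun w => a ++ w)) := by
  unfold pvStrs pvProduct
  rw [List.range_succ, List.foldl_append]
  simp [List.map_flatMap, List.flatMap_map, Function.comp_def, pv_join_append]

theorem pv_Lw_upd (word : String) (s : PySem.Set String) :
    PySem.Set.update s (pvLw word) = pvSubChars.foldl (fun d sub =>
      pvSubKeys.foldl (fun d key => PySem.Set.add d (PySem.Str.replace word key sub)) d) s := by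
  simp only [pvLw, pvSubChars, pvSubKeys, List.flatMap_cons, List.flatMap_nil, List.append_nil,
    List.foldl_cons, List.foldl_nil, PySem.Set.update_append, PySem.Set.update_map_eq_foldl_add]

theorem pv_genvar (word : String) :
    generate_variations word = PySem.Set.update [word] (pvLw word) := by
  unfold generate_variations
  rw [show PySem.Dict.items pvSubstitutions =
      [("a", "@"), ("e", "3"), ("i", "1"), ("o", "0"), ("s", "$")] from rfl,
    show PySem.Dict.keys pvSubstitutions = ["a", "e", "i", "o", "s"] from rfl,
    show PySem.Set.ofList [word] = [word] from rfl]
  simp only [List.foldl_cons, List.foldl_nil, pvLw, pvSubChars, pvSubKeys, List.flatMap_cons,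
    List.flatMap_nil, List.append_nil, PySem.Set.update_append]

-- the per-word step of A equals the per-word step of B
theorem pv_step_eq (d : PySem.Set String) (word : String) :
    PySem.Set.update (PySem.Set.update d (generate_variations word))
      ((PySem.List.pyRange 0 100 1).map (fun num => word ++ PySem.Int.toStr num)) =
    (PySem.List.pyRange 0 100 1).foldl (fun d num => PySem.Set.add d (word ++ PySem.Int.toStr num))
      (PySem.Set.update d (pvSubChars.foldl (fun d sub =>
          pvSubKeys.foldl (fun d key => PySem.Set.add d (PySem.Str.replace word key sub)) d)
        (PySem.Set.ofList [word]))) := by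
  rw [show PySem.Set.ofList [word] = [word] from rfl, ← pv_Lw_upd, pv_genvar,
    PySem.Set.update_map_eq_foldl_add]

-- A's product pass for one r is an update with pvStrs
theorem pv_Aprod (info : List String) (d : PySem.Set String) (r : Nat) :
    (pvProduct info r).foldl (fun d combo => PySem.Set.add d (PySem.Str.join "" combo)) d =
    PySem.Set.update d (pvStrs info r) := by
  rw [pvStrs, PySem.Set.update_map_eq_foldl_add]

-- one incremental step of B advances the deduplicated level
theorem pv_cur_step (info : List String) (r : Nat) :
    PySem.Set.ofList ((PySem.Set.ofList (pvStrs info r)).flatMap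
      (fun pre => info.map (fun w => pre ++ w))) = PySem.Set.ofList (pvStrs info (r + 1)) := by
  rw [pv_ofList_flatMap, ← pv_strs_succ]

-- the two product phases agree
theorem pv_phase2 (info : List String) (d : PySem.Set String) :
    (PySem.List.pyRange 2 6 1).foldl (fun d r =>
      (pvProduct info r.toNat).foldl (fun d combo => PySem.Set.add d (PySem.Str.join "" combo)) d) d =
    ((List.range 4).foldl (fun (st : PySem.Set String × List String) _ =>
      let current := PySem.List.dedup (st.2.flatMap (fun pre => info.map (fun w => pre ++ w)))
      (PySem.Set.update st.1 current, current)) (d, info)).1 := by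
  have h21 : pvStrs info 2 = info.flatMap (fun pre => info.map (fun w => pre ++ w)) := by
    have h := pv_strs_succ info 1
    rw [pv_strs_one] at h
    exact h
  have e2 : PySem.Set.ofList ((PySem.Set.ofList (pvStrs info 2)).flatMap
      (fun pre => info.map (fun w => pre ++ w))) = PySem.Set.ofList (pvStrs info 3) :=
    pv_cur_step info 2
  have e3 : PySem.Set.ofList ((PySem.Set.ofList (pvStrs info 3)).flatMap
      (fun pre => info.map (fun w => pre ++ w))) = PySem.Set.ofList (pvStrs info 4) :=
    pv_cur_step info 3
  have e4 : PySem.Set.ofList ((PySem.Set.ofList (pvStrs info 4)).flatMap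
      (fun pre => info.map (fun w => pre ++ w))) = PySem.Set.ofList (pvStrs info 5) :=
    pv_cur_step info 4
  rw [show PySem.List.pyRange 2 6 1 = [2, 3, 4, 5] from rfl,
    show List.range 4 = [0, 1, 2, 3] from rfl]
  simp only [List.foldl_cons, List.foldl_nil]
  rw [pv_Aprod, pv_Aprod, pv_Aprod, pv_Aprod]
  rw [show ((2 : Int)).toNat = 2 from rfl, show ((3 : Int)).toNat = 3 from rfl,
    show ((4 : Int)).toNat = 4 from rfl, show ((5 : Int)).toNat = 5 from rfl]
  simp only [PySem.List.dedup_eq_ofList]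
  rw [← h21, e2, e3, e4]
  rw [pv_upd_ofList, pv_upd_ofList, pv_upd_ofList, pv_upd_ofList]

-- ===== VERDICT (by name: the statement is the Claim_ definition above) =====
theorem generate_personalised_dictionary_spec : Claim_equal_generate_personalised_dictionary := by
  intro info _
  show generate_personalised_dictionary info = generate_personalised_dictionary_alt info
  unfold generate_personalised_dictionary generate_personalised_dictionary_alt
  simp only []
  have h1 : (fun (d : PySem.Set String) word =>
      PySem.Set.update (PySem.Set.update d (generate_variations word))
        ((PySem.List.pyRange 0 100 1).map (fun num => word ++ PySem.Int.toStr num))) =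
      (fun (d : PySem.Set String) word =>
        let variations : PySem.Set String := PySem.Set.ofList [word]
        let variations := pvSubChars.foldl (fun d sub =>
            pvSubKeys.foldl (fun d key => PySem.Set.add d (PySem.Str.replace word key sub)) d) variations
        let d := PySem.Set.update d variations
        (PySem.List.pyRange 0 100 1).foldl (fun d num => PySem.Set.add d (word ++ PySem.Int.toStr num)) d) := by
    funext d word; exact pv_step_eq d word
  rw [h1]
  exact pv_phase2 info _
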